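-- pv_equiv track=rewrite | github.com/jw5374/InterviewLIbrary | leet/mergeSimilar.py | mergeHashed
-- ===== SOURCE A (Python) =====
-- def mergeHashed(items1: list[list[int]], items2: list[list[int]]) -> list[list[int]]:
-- 	hash = {}
-- 	res = []
-- 	for val, weight in (items1 + items2):
-- 		if val in hash:
-- 			hash[val] += weight
-- 		else:
-- 			hash[val] = weight
-- 	for key, val in hash.items():
-- 		res.append([key, val])
--
-- 	# still need to sort T_T
-- 	res.sort(key=lambda item: item[0])
-- 	return res
-- ===== SOURCE B (Python) =====
-- def mergeHashed(items1: list[list[int]], items2: list[list[int]]) -> list[list[int]]: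
-- 	merged = sorted(items1 + items2, key=lambda item: item[0])
-- 	res = []
-- 	for val, weight in merged:
-- 		if res and res[-1][0] == val:
-- 			res[-1][1] += weight
-- 		else:
-- 			res.append([val, weight])
-- 	return res
-- ===== Notes on version B (the rewrite author's own statement) =====
-- stated objective: idiomatic
-- what changed: Replaced the hash-accumulation pass plus final sort by a single sort of the concatenated pairs followed by one linear merge of consecutive equal-value runs, so no dict is built and no separate sort of the result is needed.
import Mathlib
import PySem

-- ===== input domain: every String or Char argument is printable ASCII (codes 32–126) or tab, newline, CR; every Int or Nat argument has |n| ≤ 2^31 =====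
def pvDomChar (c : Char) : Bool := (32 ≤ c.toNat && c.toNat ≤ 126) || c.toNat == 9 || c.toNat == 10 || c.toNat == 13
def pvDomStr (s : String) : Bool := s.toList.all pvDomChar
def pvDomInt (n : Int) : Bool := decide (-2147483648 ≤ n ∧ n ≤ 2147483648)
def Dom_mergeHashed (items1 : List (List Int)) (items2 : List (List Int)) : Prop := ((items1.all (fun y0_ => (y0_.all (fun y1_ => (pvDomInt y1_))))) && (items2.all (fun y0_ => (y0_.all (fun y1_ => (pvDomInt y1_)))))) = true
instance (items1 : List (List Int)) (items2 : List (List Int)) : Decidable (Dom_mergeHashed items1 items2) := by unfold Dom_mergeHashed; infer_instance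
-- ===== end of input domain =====

-- B replaces A's dict-accumulation pass plus final sort by one sort of the concatenated
-- pairs followed by a single linear merge of consecutive equal-value runs (idiomatic; same
-- asymptotic cost). Neither implementation mutates its arguments' observable contents
-- (A sorts only its own fresh result list).

-- ===== PORT A =====
def mergeHashed (items1 : List (List Int)) (items2 : List (List Int)) : List (List Int) :=
  PySem.List.sorted
    (((items1 ++ items2).foldl
        (fun h l =>
          let val := PySem.List.pyGetD l 0 0
          let weight := PySem.List.pyGetD l 1 0
          if h.contains val then h.insert val (h.getD val 0 + weight)
          else h.insert val weight)
        (PySem.Dict.empty : PySem.Dict Int Int)).items.map (fun p => [p.1, p.2]))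
    (fun item => PySem.List.pyGetD item 0 0) false

-- ===== PORT B =====
def mergeHashed_alt (items1 : List (List Int)) (items2 : List (List Int)) : List (List Int) :=
  (((PySem.List.sorted (items1 ++ items2) (fun item => PySem.List.pyGetD item 0 0) false).foldl
      (fun res l =>
        let val := PySem.List.pyGetD l 0 0
        let weight := PySem.List.pyGetD l 1 0
        match res with
        | (v0, w0) :: rest =>
          if v0 == val then (v0, w0 + weight) :: rest
          else (val, weight) :: (v0, w0) :: rest
        | [] => [(val, weight)])
      ([] : List (Int × Int))).reverse).map (fun p => [p.1, p.2])

-- ===== PRECONDITION & SPEC =====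
-- Pre_ excludes exactly the inputs where Python's A raises (ValueError: the tuple
-- unpacking 'for val, weight in …' needs every inner list to have exactly two elements).
def Pre_mergeHashed (items1 : List (List Int)) (items2 : List (List Int)) : Prop :=
  ∀ l ∈ items1 ++ items2, l.length = 2
instance (items1 : List (List Int)) (items2 : List (List Int)) : Decidable (Pre_mergeHashed items1 items2) := by unfold Pre_mergeHashed; infer_instance
def pvWitness_mergeHashed : List (List Int) × List (List Int) := ([[1, 2], [3, 4]], [[1, 5]])

def Spec_mergeHashed (items1 : List (List Int)) (items2 : List (List Int)) (out : List (List Int)) : Prop := out = mergeHashed_alt items1 items2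
instance (items1 : List (List Int)) (items2 : List (List Int)) (out : List (List Int)) : Decidable (Spec_mergeHashed items1 items2 out) := by unfold Spec_mergeHashed; infer_instance

-- ===== CLAIM (what is proved, stated in full; the proofs are below) =====
def Claim_equal_mergeHashed : Prop := ∀ (items1 : List (List Int)) (items2 : List (List Int)), Dom_mergeHashed items1 items2 → Pre_mergeHashed items1 items2 → Spec_mergeHashed items1 items2 (mergeHashed items1 items2)

-- ===== LEMMAS AND PROOFS =====

-- the value and the weight of a pair, as both ports read them
def pvKey (l : List Int) : Int := PySem.List.pyGetD l 0 0
def pvWt (l : List Int) : Int := PySem.List.pyGetD l 1 0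

-- A's loop body (after the contains-test is resolved: both branches store getD+weight)
def pvStepA (h : PySem.Dict Int Int) (l : List Int) : PySem.Dict Int Int :=
  h.insert (pvKey l) (h.getD (pvKey l) 0 + pvWt l)

-- B's loop body
def pvStepB (res : List (Int × Int)) (l : List Int) : List (Int × Int) :=
  match res with
  | (v0, w0) :: rest =>
    if v0 == pvKey l then (v0, w0 + pvWt l) :: rest
    else (pvKey l, pvWt l) :: (v0, w0) :: rest
  | [] => [(pvKey l, pvWt l)]

-- total weight of value k in xs
def pvTot (xs : List (List Int)) (k : Int) : Int :=
  ((xs.filter (fun l => pvKey l == k)).map pvWt).sum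

-- the common normal form: one [value, total] per distinct value, values ascending
def pvCanon (xs : List (List Int)) : List (List Int) :=
  (PySem.List.sorted (PySem.Set.ofList (xs.map pvKey)) (fun x => x) false).map
    (fun k => [k, pvTot xs k])

-- run-merge of consecutive equal-value groups, front to back
def pvGroups : List (List Int) → List (Int × Int)
  | [] => []
  | l :: t =>
    (pvKey l, pvWt l + ((t.takeWhile (fun x => pvKey x == pvKey l)).map pvWt).sum) ::
      pvGroups (t.dropWhile (fun x => pvKey x == pvKey l))
termination_by ys => ys.length
decreasing_by
  simp only [List.length_cons]
  exact Nat.lt_succ_of_le (List.length_dropWhile_le _ t)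

lemma pvKey_pair (k t : Int) : pvKey [k, t] = k := by
  simp [pvKey, PySem.List.pyGetD]

-- ---- A side ----

lemma stepA_eq :
    (fun (h : PySem.Dict Int Int) (l : List Int) =>
      let val := PySem.List.pyGetD l 0 0
      let weight := PySem.List.pyGetD l 1 0
      if h.contains val then h.insert val (h.getD val 0 + weight)
      else h.insert val weight) = pvStepA := by
  funext h l
  simp only [pvStepA, pvKey, pvWt]
  by_cases hc : h.contains (PySem.List.pyGetD l 0 0) = true
  · simp [hc]
  · have hc' : h.contains (PySem.List.pyGetD l 0 0) = false := by
      simpa using hc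
    have h0 : h.getD (PySem.List.pyGetD l 0 0) 0 = 0 :=
      PySem.Dict.getD_of_not_contains _ _ hc'
    simp [hc', h0]

lemma getD_foldl_stepA (xs : List (List Int)) (d : PySem.Dict Int Int) (v : Int) :
    (xs.foldl pvStepA d).getD v 0 = d.getD v 0 + pvTot xs v := by
  induction xs generalizing d with
  | nil => simp [pvTot]
  | cons l t ih =>
    rw [List.foldl_cons, ih]
    have htot : pvTot (l :: t) v = (if pvKey l = v then pvWt l else 0) + pvTot t v := by
      unfold pvTot
      rw [List.filter_cons]
      by_cases hv : pvKey l = v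
      · simp [hv]
      · simp [hv]
    rw [htot]
    simp only [pvStepA, PySem.Dict.getD_insert]
    by_cases hv : v = pvKey l
    · rw [if_pos hv, if_pos hv.symm, hv]
      ring
    · rw [if_neg hv, if_neg (fun h => hv h.symm)]
      ring

lemma keys_foldl_stepA (xs : List (List Int)) :
    (xs.foldl pvStepA (PySem.Dict.empty : PySem.Dict Int Int)).keys
      = PySem.Set.ofList (xs.map pvKey) := by
  have h := PySem.Dict.keys_foldl_insert_key xs pvKey
    (fun d x => d.getD (pvKey x) 0 + pvWt x) (PySem.Dict.empty : PySem.Dict Int Int)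
  simpa [pvStepA, PySem.Dict.keys_empty, PySem.Set.update_nil_left] using h

lemma nodup_keys_foldl_stepA (xs : List (List Int)) :
    (xs.foldl pvStepA (PySem.Dict.empty : PySem.Dict Int Int)).keys.Nodup := by
  have h := PySem.Dict.nodup_keys_foldl_insert_key xs pvKey
    (fun d x => d.getD (pvKey x) 0 + pvWt x) (PySem.Dict.empty : PySem.Dict Int Int)
    (by simp [PySem.Dict.keys_empty])
  simpa [pvStepA] using h

lemma A_eq_canon (items1 items2 : List (List Int)) :
    mergeHashed items1 items2 = pvCanon (items1 ++ items2) := by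
  unfold mergeHashed
  rw [stepA_eq]
  set xs := items1 ++ items2 with hxs
  set h := xs.foldl pvStepA (PySem.Dict.empty : PySem.Dict Int Int) with hh
  have hnd : h.keys.Nodup := nodup_keys_foldl_stepA xs
  have hitems : h.items = h.keys.map (fun k => (k, h.getD k 0)) :=
    PySem.Dict.items_eq_map_keys h hnd 0
  have hgetD : ∀ k, h.getD k 0 = pvTot xs k := by
    intro k
    rw [hh, getD_foldl_stepA]
    simp [PySem.Dict.getD_empty]
  have hres : h.items.map (fun p => [p.1, p.2])
      = (PySem.Set.ofList (xs.map pvKey)).map (fun k => [k, pvTot xs k]) := by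
    rw [hitems, ← keys_foldl_stepA xs, ← hh, List.map_map]
    exact List.map_congr_left (fun k _ => by simp [hgetD k])
  rw [hres]
  apply PySem.List.sorted_eq_of_perm_of_pairwise_lt
  · exact ((PySem.List.sorted_perm (PySem.Set.ofList (xs.map pvKey)) (fun x => x) false).map _)
  · have hp := PySem.List.sorted_ofList_pairwise_lt (xs.map pvKey)
    refine (List.pairwise_map.mpr ?_)
    exact hp.imp (fun {a b} hab => by simpa [pvKey_pair] using hab)

-- ---- B side ----

-- entries below the accumulator's head are inert
lemma foldl_stepB_cons (ys : List (List Int)) (a : Int × Int) (rest : List (Int × Int)) :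
    ys.foldl pvStepB (a :: rest) = ys.foldl pvStepB [a] ++ rest := by
  induction ys generalizing a rest with
  | nil => simp
  | cons l t ih =>
    obtain ⟨v0, w0⟩ := a
    rw [List.foldl_cons, List.foldl_cons]
    by_cases hv : v0 = pvKey l
    · simp only [pvStepB, hv, beq_self_eq_true, if_true]
      exact ih _ _
    · have hb : (v0 == pvKey l) = false := by simp [hv]
      simp only [pvStepB, hb, Bool.false_eq_true, if_false]
      rw [ih (pvKey l, pvWt l) ((v0, w0) :: rest), ih (pvKey l, pvWt l) [(v0, w0)]]
      simp

-- a run of equal values is absorbed into the head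
lemma foldl_stepB_run (t : List (List Int)) (v s : Int) :
    t.foldl pvStepB [(v, s)]
      = (t.dropWhile (fun x => pvKey x == v)).foldl pvStepB
          [(v, s + ((t.takeWhile (fun x => pvKey x == v)).map pvWt).sum)] := by
  induction t generalizing s with
  | nil => simp
  | cons x r ih =>
    by_cases hv : pvKey x = v
    · have hb : (pvKey x == v) = true := by simp [hv]
      rw [List.foldl_cons]
      have hstep : pvStepB [(v, s)] x = [(v, s + pvWt x)] := by
        simp [pvStepB, hv]
      rw [hstep, ih (s + pvWt x)]
      simp [hb, add_assoc]
    · have hb : (pvKey x == v) = false := by simp [hv]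
      simp [hb]

-- once the next value differs, the head is final
lemma foldl_stepB_newhead (t : List (List Int)) (v s : Int)
    (h : ∀ x, t.head? = some x → pvKey x ≠ v) :
    t.foldl pvStepB [(v, s)] = t.foldl pvStepB [] ++ [(v, s)] := by
  cases t with
  | nil => simp
  | cons x r =>
    have hx : pvKey x ≠ v := h x rfl
    have hb : (v == pvKey x) = false := by simp [Ne.symm hx]
    rw [List.foldl_cons, List.foldl_cons]
    have h1 : pvStepB [(v, s)] x = (pvKey x, pvWt x) :: [(v, s)] := by
      simp [pvStepB, hb]
    have h2 : pvStepB [] x = [(pvKey x, pvWt x)] := by simp [pvStepB]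
    rw [h1, h2, foldl_stepB_cons]

lemma head_dropWhile_ne {α : Type} (p : α → Bool) (t : List α) (x : α)
    (hx : (t.dropWhile p).head? = some x) : p x = false := by
  induction t with
  | nil => simp at hx
  | cons y r ih =>
    rw [List.dropWhile_cons] at hx
    by_cases hp : p y = true
    · rw [if_pos hp] at hx; exact ih hx
    · rw [if_neg hp] at hx
      have hyx : y = x := by simpa using hx
      rw [← hyx]
      simpa using hp

-- B's fold, reversed, is the front-to-back run merge
lemma foldl_stepB_eq_groups : ∀ (n : Nat) (ys : List (List Int)), ys.length ≤ n →
    (ys.foldl pvStepB []).reverse = pvGroups ys := by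
  intro n
  induction n with
  | zero =>
    intro ys hy
    have hnil : ys = [] := List.length_eq_zero_iff.mp (Nat.le_zero.mp hy)
    simp [hnil, pvGroups]
  | succ m ih =>
    intro ys hy
    cases ys with
    | nil => simp [pvGroups]
    | cons l t =>
      rw [List.foldl_cons]
      have h0 : pvStepB [] l = [(pvKey l, pvWt l)] := by simp [pvStepB]
      rw [h0, foldl_stepB_run]
      set dr := t.dropWhile (fun x => pvKey x == pvKey l) with hdr
      have hhead : ∀ x, dr.head? = some x → pvKey x ≠ pvKey l := by
        intro x hx he
        have hfalse := head_dropWhile_ne _ t x hx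
        simp [he] at hfalse
      rw [foldl_stepB_newhead _ _ _ hhead]
      have hlen : dr.length ≤ m := by
        have h1 : dr.length ≤ t.length := List.length_dropWhile_le _ t
        have h2 : t.length + 1 ≤ m + 1 := by simpa using hy
        omega
      rw [List.reverse_append]
      simp only [List.reverse_cons, List.reverse_nil, List.nil_append]
      rw [ih dr hlen]
      rw [pvGroups, ← hdr]
      rfl

-- ---- groups of a key-sorted list are the canonical form ----

lemma groups_eq_canon : ∀ (n : Nat) (ys : List (List Int)), ys.length ≤ n →
    (ys.map pvKey).Pairwise (· ≤ ·) →
    (pvGroups ys).map (fun p => [p.1, p.2]) = pvCanon ys := by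
  intro n
  induction n with
  | zero =>
    intro ys hy _
    have hnil : ys = [] := List.length_eq_zero_iff.mp (Nat.le_zero.mp hy)
    simp [hnil, pvGroups, pvCanon, PySem.List.sorted_eq_nil_iff]
  | succ m ih =>
    intro ys hy hsort
    cases ys with
    | nil => simp [pvGroups, pvCanon, PySem.List.sorted_eq_nil_iff]
    | cons l t =>
      have hsort' := hsort
      rw [List.map_cons, List.pairwise_cons] at hsort'
      obtain ⟨hle', hsortt⟩ := hsort'
      have hle : ∀ x ∈ t, pvKey l ≤ pvKey x := by
        intro x hx
        exact hle' (pvKey x) (List.mem_map_of_mem hx)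
      set tw := t.takeWhile (fun x => pvKey x == pvKey l) with htw
      set dr := t.dropWhile (fun x => pvKey x == pvKey l) with hdr2
      have htd : tw ++ dr = t := List.takeWhile_append_dropWhile
      -- every key in dr is > pvKey l
      have hgt : ∀ x ∈ dr, pvKey l < pvKey x := by
        intro x hx
        cases hdr : dr with
        | nil => rw [hdr] at hx; simp at hx
        | cons y r =>
          have hy0 : pvKey y ≠ pvKey l := by
            have hh := head_dropWhile_ne _ t y (by rw [← hdr2, hdr]; rfl)
            simpa using hh
          have hymem : y ∈ t := by
            have : y ∈ dr := by rw [hdr]; exact List.mem_cons_self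
            exact (List.dropWhile_sublist _).mem this
          have hky : pvKey l < pvKey y := lt_of_le_of_ne (hle y hymem) (Ne.symm hy0)
          rw [hdr] at hx
          rcases List.mem_cons.mp hx with rfl | hxr
          · exact hky
          · have hsub : dr.Sublist t := t.dropWhile_sublist _
            have hpdr : (dr.map pvKey).Pairwise (· ≤ ·) :=
              hsortt.sublist (hsub.map pvKey)
            have hpdr' := hpdr
            rw [hdr, List.map_cons, List.pairwise_cons] at hpdr'
            have hyx : pvKey y ≤ pvKey x := hpdr'.1 (pvKey x) (List.mem_map_of_mem hxr)
            exact lt_of_lt_of_le hky hyx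
      -- keys in tw are all pvKey l
      have htwk : ∀ x ∈ tw, pvKey x = pvKey l := by
        intro x hx
        have hh := List.mem_takeWhile_imp (htw ▸ hx)
        simpa using hh
      -- canonical key list decomposes
      have hkeys : PySem.List.sorted (PySem.Set.ofList (((l :: t).map pvKey))) (fun x => x) false
          = pvKey l :: PySem.List.sorted (PySem.Set.ofList (dr.map pvKey)) (fun x => x) false := by
        apply PySem.List.sorted_eq_of_perm_of_pairwise_lt
        · have hnd1 : (pvKey l :: PySem.List.sorted (PySem.Set.ofList (dr.map pvKey)) (fun x => x) false).Nodup := by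
            refine List.nodup_cons.mpr ⟨?_, ?_⟩
            · intro hmem
              have hmem2 : pvKey l ∈ dr.map pvKey := by
                have hm3 := (PySem.List.sorted_perm (PySem.Set.ofList (dr.map pvKey)) (fun x => x) false).mem_iff.mp hmem
                exact (PySem.Set.mem_ofList _ _).mp hm3
              rcases List.mem_map.mp hmem2 with ⟨x, hx, hkx⟩
              exact absurd (hkx ▸ hgt x hx) (lt_irrefl _)
            · exact ((PySem.List.sorted_perm _ _ _).nodup_iff).mpr (PySem.Set.nodup_ofList _)
          have hnd2 : (PySem.Set.ofList ((l :: t).map pvKey)).Nodup := PySem.Set.nodup_ofList _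
          refine (List.perm_ext_iff_of_nodup hnd1 hnd2).mpr ?_
          intro a
          simp only [List.mem_cons, PySem.List.mem_sorted, PySem.Set.mem_ofList]
          constructor
          · rintro (rfl | ha)
            · exact List.mem_map.mpr ⟨l, List.mem_cons_self, rfl⟩
            · rcases List.mem_map.mp ha with ⟨x, hx, rfl⟩
              exact List.mem_map.mpr ⟨x, List.mem_cons_of_mem _ ((t.dropWhile_sublist _).mem hx), rfl⟩
          · intro ha
            rcases List.mem_map.mp ha with ⟨x, hx, rfl⟩
            rcases List.mem_cons.mp hx with rfl | hxt
            · exact Or.inl rfl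
            · have hx2 : x ∈ tw ++ dr := htd ▸ hxt
              rcases List.mem_append.mp hx2 with hxtw | hxdr
              · exact Or.inl (htwk x hxtw)
              · exact Or.inr (List.mem_map.mpr ⟨x, hxdr, rfl⟩)
        · refine List.pairwise_cons.mpr ⟨?_, ?_⟩
          · intro b hb
            have hb2 : b ∈ dr.map pvKey := by
              have hb3 := (PySem.List.sorted_perm (PySem.Set.ofList (dr.map pvKey)) (fun x => x) false).mem_iff.mp hb
              exact (PySem.Set.mem_ofList _ _).mp hb3
            rcases List.mem_map.mp hb2 with ⟨x, hx, rfl⟩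
            exact hgt x hx
          · exact PySem.List.sorted_ofList_pairwise_lt _
      -- totals
      have hfil1 : tw.filter (fun x => pvKey x == pvKey l) = tw :=
        List.filter_eq_self.mpr (fun x hx => by simp [htwk x hx])
      have hfil2 : dr.filter (fun x => pvKey x == pvKey l) = [] :=
        List.filter_eq_nil_iff.mpr (fun x hx => by simp [ne_of_gt (hgt x hx)])
      have htot0 : pvTot (l :: t) (pvKey l) = pvWt l + (tw.map pvWt).sum := by
        unfold pvTot
        rw [← htd, List.filter_cons]
        simp only [beq_self_eq_true, if_true, List.filter_append, hfil1, hfil2]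
        simp
      have htotk : ∀ k, pvKey l < k → pvTot (l :: t) k = pvTot dr k := by
        intro k hk
        unfold pvTot
        rw [← htd, List.filter_cons]
        have h1 : (pvKey l == k) = false := by simp [ne_of_lt hk]
        have hfil3 : tw.filter (fun x => pvKey x == k) = [] :=
          List.filter_eq_nil_iff.mpr (fun x hx => by
            simp [htwk x hx, ne_of_lt hk])
        simp [h1, hfil3]
      -- assemble
      rw [pvGroups]
      unfold pvCanon
      rw [hkeys, List.map_cons, List.map_cons, ← htw, ← hdr2]
      have hdrlen : dr.length ≤ m := by
        have h1 : dr.length ≤ t.length := List.length_dropWhile_le _ t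
        have h2 : t.length + 1 ≤ m + 1 := by simpa using hy
        omega
      have hdrsort : (dr.map pvKey).Pairwise (· ≤ ·) :=
        hsortt.sublist ((t.dropWhile_sublist _).map pvKey)
      have hih := ih dr hdrlen hdrsort
      unfold pvCanon at hih
      congr 1
      · rw [htot0]
      · rw [hih]
        apply List.map_congr_left
        intro k hk
        have hkdr : k ∈ dr.map pvKey := by
          have hk3 := (PySem.List.sorted_perm (PySem.Set.ofList (dr.map pvKey)) (fun x => x) false).mem_iff.mp hk
          exact (PySem.Set.mem_ofList _ _).mp hk3
        rcases List.mem_map.mp hkdr with ⟨x, hx, rfl⟩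
        rw [htotk _ (hgt x hx)]

-- ---- canonical form is invariant under permutation ----

lemma canon_perm (xs ys : List (List Int)) (hp : xs.Perm ys) : pvCanon xs = pvCanon ys := by
  unfold pvCanon
  have hkp : (xs.map pvKey).Perm (ys.map pvKey) := hp.map pvKey
  have hset : (PySem.Set.ofList (xs.map pvKey)).Perm (PySem.Set.ofList (ys.map pvKey)) := by
    refine (List.perm_ext_iff_of_nodup (PySem.Set.nodup_ofList _) (PySem.Set.nodup_ofList _)).mpr ?_
    intro a
    rw [PySem.Set.mem_ofList, PySem.Set.mem_ofList]
    exact ⟨fun h => hkp.mem_iff.mp h, fun h => hkp.mem_iff.mpr h⟩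
  have hsorted : PySem.List.sorted (PySem.Set.ofList (xs.map pvKey)) (fun x => x) false
      = PySem.List.sorted (PySem.Set.ofList (ys.map pvKey)) (fun x => x) false :=
    PySem.List.sorted_eq_sorted_of_perm _ _ _ (fun a b h => h) hset
  rw [hsorted]
  apply List.map_congr_left
  intro k _
  have h2 : pvTot xs k = pvTot ys k := by
    unfold pvTot
    exact ((hp.filter _).map pvWt).sum_eq
  rw [h2]

-- ---- B assembled ----

lemma B_eq_canon (items1 items2 : List (List Int)) :
    mergeHashed_alt items1 items2 = pvCanon (items1 ++ items2) := by
  unfold mergeHashed_alt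
  have hstep : (fun (res : List (Int × Int)) (l : List Int) =>
      let val := PySem.List.pyGetD l 0 0
      let weight := PySem.List.pyGetD l 1 0
      match res with
      | (v0, w0) :: rest =>
        if v0 == val then (v0, w0 + weight) :: rest
        else (val, weight) :: (v0, w0) :: rest
      | [] => [(val, weight)]) = pvStepB := rfl
  rw [hstep]
  rw [foldl_stepB_eq_groups
    (PySem.List.sorted (items1 ++ items2) (fun item => PySem.List.pyGetD item 0 0) false).length
    _ le_rfl]
  have hsort : ((PySem.List.sorted (items1 ++ items2) (fun item => PySem.List.pyGetD item 0 0) false).map pvKey).Pairwise (· ≤ ·) := by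
    rw [List.pairwise_map]
    exact PySem.List.sorted_pairwise (items1 ++ items2) (fun item => PySem.List.pyGetD item 0 0)
  rw [groups_eq_canon _ _ le_rfl hsort]
  exact canon_perm _ _ (PySem.List.sorted_perm _ _ _)

-- ===== VERDICT (by name: the statement is the Claim_ definition above) =====
theorem mergeHashed_spec : Claim_equal_mergeHashed := by
  intro items1 items2 _ _
  unfold Spec_mergeHashed
  rw [A_eq_canon, B_eq_canon]
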